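-- pv_equiv track=rewrite | github.com/vanshrana21/Ieee | backend/services/ai_analysis_service.py | _parse_structured_brief
-- ===== SOURCE A (Python) =====
-- from typing import List, Dict, Optional
--
-- def _parse_structured_brief(brief_text: str) -> Dict:
--     """
--     Parse AI-generated brief into structured sections.
--
--     Args:
--         brief_text: Raw AI-generated brief text
--
--     Returns:
--         Dictionary with structured sections
--     """
--     sections = {
--         "case_summary": "",
--         "legal_issues": "",
--         "holding": "",
--         "reasoning": "",
--         "outcome": "",
--         "full_brief": brief_text
--     }
--
--     # Try to extract sections using common patterns
--     lines = brief_text.split('\n')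
--     current_section = None
--     current_content = []
--
--     section_keywords = {
--         "CASE SUMMARY": "case_summary",
--         "SUMMARY": "case_summary",
--         "LEGAL ISSUES": "legal_issues",
--         "ISSUES": "legal_issues",
--         "COURT'S HOLDING": "holding",
--         "HOLDING": "holding",
--         "DECISION": "holding",
--         "REASONING": "reasoning",
--         "RATIONALE": "reasoning",
--         "FINAL OUTCOME": "outcome",
--         "OUTCOME": "outcome",
--         "RESULT": "outcome"
--     }
--
--     for line in lines:
--         line_upper = line.strip().upper()
--
--         # Check if this line is a section header
--         matched_section = None
--         for keyword, section_key in section_keywords.items():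
--             if keyword in line_upper and len(line.strip()) < 50:
--                 matched_section = section_key
--                 break
--
--         if matched_section:
--             # Save previous section
--             if current_section and current_content:
--                 sections[current_section] = '\n'.join(current_content).strip()
--
--             # Start new section
--             current_section = matched_section
--             current_content = []
--         elif current_section and line.strip():
--             current_content.append(line)
--
--     # Save last section
--     if current_section and current_content:
--         sections[current_section] = '\n'.join(current_content).strip()
--
--     # If parsing failed, use full text as summary
--     if not any(sections[k] for k in ["case_summary", "legal_issues", "holding"]):
--         sections["case_summary"] = brief_text[:500]
--         sections["legal_issues"] = "See full brief below"
--         sections["holding"] = "See full brief below"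
--         sections["reasoning"] = "See full brief below"
--         sections["outcome"] = "See full brief below"
--
--     return sections
-- ===== SOURCE B (Python) =====
-- def _parse_structured_brief(brief_text: str):
--     """Parse AI-generated brief into structured sections (span-based parser)."""
--     section_keywords = [
--         ("CASE SUMMARY", "case_summary"),
--         ("SUMMARY", "case_summary"),
--         ("LEGAL ISSUES", "legal_issues"),
--         ("ISSUES", "legal_issues"),
--         ("COURT'S HOLDING", "holding"),
--         ("HOLDING", "holding"),
--         ("DECISION", "holding"),
--         ("REASONING", "reasoning"),
--         ("RATIONALE", "reasoning"),
--         ("FINAL OUTCOME", "outcome"),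
--         ("OUTCOME", "outcome"),
--         ("RESULT", "outcome"),
--     ]
--
--     def _header_key(line):
--         stripped = line.strip()
--         if len(stripped) < 50:
--             upper = stripped.upper()
--             for keyword, key in section_keywords:
--                 if keyword in upper:
--                     return key
--         return None
--
--     sections = {
--         "case_summary": "",
--         "legal_issues": "",
--         "holding": "",
--         "reasoning": "",
--         "outcome": "",
--         "full_brief": brief_text,
--     }
--
--     lines = brief_text.split('\n')
--     n = len(lines)
--     i = 0
--     while i < n:
--         key = _header_key(lines[i])
--         i += 1
--         if key is None:
--             continue
--         # consume this section's body: lines up to the next header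
--         body = []
--         while i < n and _header_key(lines[i]) is None:
--             if lines[i].strip():
--                 body.append(lines[i])
--             i += 1
--         if body:
--             sections[key] = '\n'.join(body).strip()
--
--     if not any(sections[k] for k in ["case_summary", "legal_issues", "holding"]):
--         sections["case_summary"] = brief_text[:500]
--         sections["legal_issues"] = "See full brief below"
--         sections["holding"] = "See full brief below"
--         sections["reasoning"] = "See full brief below"
--         sections["outcome"] = "See full brief below"
--
--     return sections
-- ===== Notes on version B (the rewrite author's own statement) =====
-- stated objective: alternative
-- what changed: A's single-pass state machine (carrying current_section/current_content and saving on each header transition and at EOF) is replaced by a span-based parser with a _header_key helper: find the next header line, consume that section's whole body span in an inner loop, assign it if non-empty, and repeat.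
import Mathlib
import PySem

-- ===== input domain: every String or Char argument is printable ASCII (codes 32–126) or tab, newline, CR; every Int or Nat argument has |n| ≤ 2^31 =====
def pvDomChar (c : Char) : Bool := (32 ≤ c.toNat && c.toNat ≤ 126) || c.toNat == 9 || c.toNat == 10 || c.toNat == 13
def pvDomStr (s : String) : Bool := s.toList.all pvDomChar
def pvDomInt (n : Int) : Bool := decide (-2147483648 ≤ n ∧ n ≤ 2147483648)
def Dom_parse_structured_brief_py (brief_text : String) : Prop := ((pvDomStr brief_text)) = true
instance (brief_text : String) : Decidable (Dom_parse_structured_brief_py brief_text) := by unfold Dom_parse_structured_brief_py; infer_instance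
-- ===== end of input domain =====

-- B replaces A's one-pass state machine (current_section/current_content carried through a single
-- loop with save-on-transition) by a span-based parser: find a header, consume that section's body
-- span, assign it, repeat; objective: alternative decomposition, same cost.


-- ===== PORT A =====
-- the section_keywords dict of both Pythons (association pairs, same order)
def pvKeywords : List (String × String) :=
  [("CASE SUMMARY", "case_summary"), ("SUMMARY", "case_summary"),
   ("LEGAL ISSUES", "legal_issues"), ("ISSUES", "legal_issues"),
   ("COURT'S HOLDING", "holding"), ("HOLDING", "holding"), ("DECISION", "holding"),
   ("REASONING", "reasoning"), ("RATIONALE", "reasoning"),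
   ("FINAL OUTCOME", "outcome"), ("OUTCOME", "outcome"), ("RESULT", "outcome")]

-- the initial sections dict of both Pythons
def pvInitSections (brief_text : String) : PySem.Dict String String :=
  PySem.Dict.ofList
    [("case_summary", ""), ("legal_issues", ""), ("holding", ""),
     ("reasoning", ""), ("outcome", ""), ("full_brief", brief_text)]

-- the identical fallback block closing both Pythons ("if parsing failed, use full text as summary")
def pvFallback (brief_text : String) (sections : PySem.Dict String String) : PySem.Dict String String :=
  if ¬ (["case_summary", "legal_issues", "holding"].any (fun k => sections.getD k "" != "")) then
    ((((sections.insert "case_summary" (PySem.Str.slice brief_text none (some 500))).insert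
        "legal_issues" "See full brief below").insert
        "holding" "See full brief below").insert
        "reasoning" "See full brief below").insert
        "outcome" "See full brief below"
  else sections

-- A's "save previous section" code (appears inside the loop and after it)
def pvSaveA (sections : PySem.Dict String String) (cur : Option String) (content : List String) :
    PySem.Dict String String :=
  match cur with
  | some cs => if content ≠ [] then sections.insert cs (PySem.Str.strip (PySem.Str.join "\n" content)) else sections
  | none => sections

-- A's loop body: state = (sections, current_section, current_content)
def pvStepA (st : PySem.Dict String String × Option String × List String) (line : String) :
    PySem.Dict String String × Option String × List String :=
  let lineUpper := PySem.Str.upper (PySem.Str.strip line)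
  let matched : Option String :=
    (pvKeywords.find? (fun kv =>
      PySem.Str.isIn kv.1 lineUpper && decide (PySem.Str.len (PySem.Str.strip line) < 50))).map (·.2)
  -- Python's 'if matched_section: … elif current_section and line.strip(): … ' — the Option
  -- truthiness test on matched ported as Option.elim (some ↦ header branch, none ↦ elif/else branch)
  matched.elim
    (match st.2.1 with
     | some _ => if PySem.Str.strip line ≠ "" then (st.1, st.2.1, st.2.2 ++ [line]) else st
     | none => st)
    (fun key => (pvSaveA st.1 st.2.1 st.2.2, some key, []))

def parse_structured_brief_py (brief_text : String) : List (String × String) :=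
  let lines := (PySem.Str.split? brief_text "\n").getD []   -- split? is `some` for the nonempty separator "\n"
  let st := lines.foldl pvStepA (pvInitSections brief_text, none, [])
  (pvFallback brief_text (pvSaveA st.1 st.2.1 st.2.2)).items

-- ===== PORT B =====
-- B's _header_key helper
def pvHeaderKey (line : String) : Option String :=
  let stripped := PySem.Str.strip line
  if PySem.Str.len stripped < 50 then
    let upper := PySem.Str.upper stripped
    (pvKeywords.find? (fun kv => PySem.Str.isIn kv.1 upper)).map (·.2)
  else none

-- B's inner while: consume the body span (non-header lines, keeping the non-blank ones); returns (body, rest)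
def pvBodyLoop : List String → List String × List String
  | [] => ([], [])
  | l :: ls =>
    if (pvHeaderKey l).isSome then ([], l :: ls)
    else
      let r := pvBodyLoop ls
      (if PySem.Str.strip l ≠ "" then l :: r.1 else r.1, r.2)

-- B's outer while over the lines; the fuel (first) argument only makes the recursion structural —
-- it is called with fuel = lines.length and never runs out, since the rest returned by pvBodyLoop
-- is a tail of the suffix being processed
def pvSegLoop : Nat → PySem.Dict String String → List String → PySem.Dict String String
  | 0, sections, _ => sections
  | _ + 1, sections, [] => sections
  | fuel + 1, sections, l :: ls =>
    (pvHeaderKey l).elim (pvSegLoop fuel sections ls)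
      (fun key =>
        let r := pvBodyLoop ls
        pvSegLoop fuel
          (if r.1 ≠ [] then sections.insert key (PySem.Str.strip (PySem.Str.join "\n" r.1)) else sections)
          r.2)

def parse_structured_brief_py_alt (brief_text : String) : List (String × String) :=
  let lines := (PySem.Str.split? brief_text "\n").getD []   -- split? is `some` for the nonempty separator "\n"
  let sections := pvSegLoop lines.length (pvInitSections brief_text) lines
  (pvFallback brief_text sections).items

-- ===== PRECONDITION & SPEC =====
def Spec_parse_structured_brief_py (brief_text : String) (out : List (String × String)) : Prop := out = parse_structured_brief_py_alt brief_text
instance (brief_text : String) (out : List (String × String)) : Decidable (Spec_parse_structured_brief_py brief_text out) := by unfold Spec_parse_structured_brief_py; infer_instance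

-- ===== CLAIM (what is proved, stated in full; the proofs are below) =====
def Claim_equal_parse_structured_brief_py : Prop := ∀ (brief_text : String), Dom_parse_structured_brief_py brief_text → Spec_parse_structured_brief_py brief_text (parse_structured_brief_py brief_text)

-- ===== LEMMAS AND PROOFS =====

-- A's inline header test equals B's _header_key
theorem pvHeader_eq (line : String) :
    ((pvKeywords.find? (fun kv =>
      PySem.Str.isIn kv.1 (PySem.Str.upper (PySem.Str.strip line)) &&
      decide (PySem.Str.len (PySem.Str.strip line) < 50))).map (·.2)) = pvHeaderKey line := by
  by_cases h : (PySem.Chars.strip line.toList).length < 50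
  · simp [pvHeaderKey, h]
  · simp [pvHeaderKey, h, pvKeywords, List.find?]

theorem pvBodyLoop_rest_le (ls : List String) : (pvBodyLoop ls).2.length ≤ ls.length := by
  induction ls with
  | nil => simp [pvBodyLoop]
  | cons l ls ih =>
    rw [pvBodyLoop]
    split
    · simp
    · simpa using Nat.le_succ_of_le ih

-- the fuel does not matter as long as it is at least the number of lines
theorem pvSegLoop_congr : ∀ (f1 f2 : Nat) (sections : PySem.Dict String String) (xs : List String),
    xs.length ≤ f1 → xs.length ≤ f2 → pvSegLoop f1 sections xs = pvSegLoop f2 sections xs := by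
  intro f1
  induction f1 with
  | zero =>
    intro f2 sections xs h1 _
    have : xs = [] := List.eq_nil_of_length_eq_zero (Nat.le_zero.mp h1)
    subst this
    cases f2 <;> rfl
  | succ g ih =>
    intro f2 sections xs h1 h2
    cases xs with
    | nil => cases f2 <;> rfl
    | cons l ls =>
      cases f2 with
      | zero => simp at h2
      | succ g2 =>
        rw [pvSegLoop, pvSegLoop]
        cases hk : pvHeaderKey l with
        | none =>
          simp only [Option.elim]
          exact ih g2 sections ls (by simpa using h1) (by simpa using h2)
        | some key =>
          simp only [Option.elim]
          have hr := pvBodyLoop_rest_le ls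
          exact ih g2 _ _ (by simp at h1; omega) (by simp at h2; omega)

-- B's outer loop at its canonical fuel (proof-side abbreviation)
def pvSegRun (sections : PySem.Dict String String) (xs : List String) : PySem.Dict String String :=
  pvSegLoop xs.length sections xs

theorem pvSegRun_nil (sections : PySem.Dict String String) : pvSegRun sections [] = sections := rfl

theorem pvSegRun_cons_none {l : String} (ls : List String) (sections : PySem.Dict String String)
    (hk : pvHeaderKey l = none) : pvSegRun sections (l :: ls) = pvSegRun sections ls := by
  unfold pvSegRun
  rw [List.length_cons, pvSegLoop, hk]
  rfl

theorem pvSegRun_cons_some {l key : String} (ls : List String) (sections : PySem.Dict String String)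
    (hk : pvHeaderKey l = some key) : pvSegRun sections (l :: ls) =
      pvSegRun (pvSaveA sections (some key) (pvBodyLoop ls).1) (pvBodyLoop ls).2 := by
  unfold pvSegRun
  rw [List.length_cons, pvSegLoop, hk]
  simp only [Option.elim, pvSaveA]
  exact pvSegLoop_congr _ _ _ _ (pvBodyLoop_rest_le ls) (Nat.le_refl _)

-- A's loop from an "inside a section" state = save the pending section at the next boundary, continue as B
theorem pvLoop_some (lines : List String) :
    ∀ (sections : PySem.Dict String String) (k : String) (content : List String),
      pvSaveA (lines.foldl pvStepA (sections, some k, content)).1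
          (lines.foldl pvStepA (sections, some k, content)).2.1
          (lines.foldl pvStepA (sections, some k, content)).2.2 =
        pvSegRun (pvSaveA sections (some k) (content ++ (pvBodyLoop lines).1)) (pvBodyLoop lines).2 := by
  induction lines with
  | nil => intro sections k content; simp [pvBodyLoop, pvSegRun_nil]
  | cons l ls ih =>
    intro sections k content
    simp only [List.foldl_cons]
    cases hk : pvHeaderKey l with
    | some key =>
      have hstep : pvStepA (sections, some k, content) l =
          (pvSaveA sections (some k) content, some key, ([] : List String)) := by
        simp only [pvStepA]; rw [pvHeader_eq l, hk]; rfl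
      rw [hstep, ih]
      rw [pvBodyLoop]; simp only [hk, Option.isSome_some, if_pos]
      rw [pvSegRun_cons_some ls _ hk]
      simp [pvSaveA]
    | none =>
      have hstep : pvStepA (sections, some k, content) l =
          if PySem.Str.strip l ≠ "" then (sections, some k, content ++ [l])
          else (sections, some k, content) := by
        simp only [pvStepA]; rw [pvHeader_eq l, hk]; rfl
      rw [hstep]
      rw [pvBodyLoop]; simp only [hk, Option.isSome_none, Bool.false_eq_true]
      by_cases hb : PySem.Str.strip l ≠ ""
      · simp only [if_pos hb]
        rw [ih]
        simp
      · simp only [if_neg hb]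
        rw [ih]
        simp

-- A's loop from the initial "no section yet" state computes B's segment loop
theorem pvLoop_none (lines : List String) :
    ∀ (sections : PySem.Dict String String),
      pvSaveA (lines.foldl pvStepA (sections, none, [])).1
          (lines.foldl pvStepA (sections, none, [])).2.1
          (lines.foldl pvStepA (sections, none, [])).2.2 =
        pvSegRun sections lines := by
  induction lines with
  | nil => intro sections; simp [pvSaveA, pvSegRun_nil]
  | cons l ls ih =>
    intro sections
    simp only [List.foldl_cons]
    cases hk : pvHeaderKey l with
    | some key =>
      have hstep : pvStepA (sections, none, []) l = (sections, some key, ([] : List String)) := by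
        simp only [pvStepA]; rw [pvHeader_eq l, hk]; rfl
      rw [hstep, pvLoop_some ls sections key []]
      rw [pvSegRun_cons_some ls _ hk]
      simp
    | none =>
      have hstep : pvStepA (sections, none, []) l = (sections, none, ([] : List String)) := by
        simp only [pvStepA]; rw [pvHeader_eq l, hk]; rfl
      rw [hstep, ih, pvSegRun_cons_none ls _ hk]

-- ===== VERDICT (by name: the statement is the Claim_ definition above) =====
theorem parse_structured_brief_py_spec : Claim_equal_parse_structured_brief_py := by
  intro brief_text _
  unfold Spec_parse_structured_brief_py parse_structured_brief_py parse_structured_brief_py_alt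
  have h := pvLoop_none ((PySem.Str.split? brief_text "\n").getD []) (pvInitSections brief_text)
  simp only [pvSegRun] at h
  exact congrArg (fun d => (pvFallback brief_text d).items) h
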